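-- pv_equiv track=rewrite | github.com/fennuDetudou/tudouNLP | tudouNLP/tools/tag_predict_utils.py | segmentor
-- ===== SOURCE A (Python) =====
-- def segmentor(texts, labels):
--
--     cut_result=[]
--     posseg_result=[]
--
--
--     for text,label in zip(texts,labels):
--         text_ = []
--         label_ = []
--
--         t, l = [], []
--         i = 0
--         while (i < len(text)):
--             if label[i].startswith(('B', 'S')):
--                 text_.append(t)
--                 label_.append(l)
--                 t = []
--                 l = []
--                 t.extend(text[i])
--                 l.extend(label[i].split('-')[-1])
--             elif label[i].startswith('I'):
--                 t.extend(text[i])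
--             i += 1
--         text_.append(t)
--         label_.append(l)
--
--         t_result = text_[1:]
--         l_result = label_[1:]
--
--         sentence=[]
--         posseg=[]
--         for i, word in enumerate(t_result):
--             sentence.append(''.join(word))
--             posseg.append(''.join(l_result[i]))
--
--         cut_result.append(sentence)
--         posseg_result.append(posseg)
--
--     results=[]
--     for c,p in zip(cut_result,posseg_result):
--         results.append(list(zip(c,p)))
--
--     return cut_result,results
-- ===== SOURCE B (Python) =====
-- def segmentor(texts, labels):
--     # Build each sentence back-to-front in a single reversed pass:
--     # a pending suffix of 'I'-labelled characters is attached to the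
--     # 'B'/'S' boundary that precedes it; no dummy leading word, no [1:].
--     cut_result = []
--     results = []
--     for text, label in zip(texts, labels):
--         words = []
--         cur = ''
--         for x, lab in zip(reversed(text), reversed(label[:len(text)])):
--             if lab.startswith(('B', 'S')):
--                 words.append((x + cur, lab.split('-')[-1]))
--                 cur = ''
--             elif lab.startswith('I'):
--                 cur = x + cur
--         words.reverse()
--         cut_result.append([w for w, _ in words])
--         results.append(words)
--     return cut_result, results
-- ===== Notes on version B (the rewrite author's own statement) =====
-- stated objective: alternative
-- what changed: B builds each sentence back-to-front in one reversed pass, attaching a pending suffix of I-labelled characters to the preceding B/S boundary, instead of A's forward while-loop with a dummy leading word discarded by [1:] and a separate join/zip pass.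
import Mathlib
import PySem

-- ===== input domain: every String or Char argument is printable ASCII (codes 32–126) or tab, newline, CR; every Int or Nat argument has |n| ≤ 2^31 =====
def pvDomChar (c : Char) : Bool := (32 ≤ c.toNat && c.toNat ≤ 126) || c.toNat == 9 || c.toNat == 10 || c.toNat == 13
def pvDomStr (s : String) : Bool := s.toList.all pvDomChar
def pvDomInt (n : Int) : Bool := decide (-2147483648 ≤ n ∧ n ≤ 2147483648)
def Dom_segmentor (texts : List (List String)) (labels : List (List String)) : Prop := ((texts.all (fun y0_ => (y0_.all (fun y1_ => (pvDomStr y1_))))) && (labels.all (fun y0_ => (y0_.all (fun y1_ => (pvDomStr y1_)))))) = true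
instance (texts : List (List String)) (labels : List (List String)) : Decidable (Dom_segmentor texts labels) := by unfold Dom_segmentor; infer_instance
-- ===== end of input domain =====

-- B replaces A's forward while-loop (dummy leading word discarded by [1:], then a
-- join pass and a zip pass) with a single back-to-front pass per sentence;
-- objective: alternative decomposition, same cost.

-- shared label tests/tag: lab.startswith(('B','S')), lab.startswith('I'), lab.split('-')[-1]
def pvIsBS (lab : String) : Bool := PySem.Str.startswith lab "B" || PySem.Str.startswith lab "S"
def pvIsI (lab : String) : Bool := PySem.Str.startswith lab "I"
def pvTagOf (lab : String) : String := ((PySem.Str.split? lab "-").getD []).getLast?.getD ""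

-- ===== PORT A =====
-- the while-loop: i walks through text, label[i] read in parallel (Pre_ guarantees
-- label is long enough; the exhausted-label case — IndexError in Python — is unreachable under Pre_)
def pvAGo : List String → List String → List (List Char) → List (List Char) → List Char → List Char → (List (List Char) × List (List Char) × List Char × List Char)
  | [], _, T, L, t, l => (T, L, t, l)
  | _ :: _, [], T, L, t, l => (T, L, t, l)
  | x :: xs, lab :: labs, T, L, t, l =>
    if pvIsBS lab then
      pvAGo xs labs (T ++ [t]) (L ++ [l]) x.toList (pvTagOf lab).toList
    else if pvIsI lab then
      pvAGo xs labs T L (t ++ x.toList) l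
    else
      pvAGo xs labs T L t l

-- one iteration of A's outer loop: text_/label_ finished, [1:], then the sentence/posseg
-- loop (the l_result[i] lookup rendered as the zip of the two equal-length lists);
-- ''.join(word) on a list of chars is String.ofList
def pvASent (text label : List String) : List String × List String :=
  let r := pvAGo text label [] [] [] []
  let tRes := (r.1 ++ [r.2.2.1]).drop 1
  let lRes := (r.2.1 ++ [r.2.2.2]).drop 1
  (tRes.zip lRes).foldl
    (fun acc p => (acc.1 ++ [String.ofList p.1], acc.2 ++ [String.ofList p.2])) ([], [])

def segmentor (texts : List (List String)) (labels : List (List String)) : List (List String) × (List (List (String × String))) :=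
  let cp := (texts.zip labels).foldl
    (fun acc p => (acc.1 ++ [(pvASent p.1 p.2).1], acc.2 ++ [(pvASent p.1 p.2).2])) ([], [])
  let results := (cp.1.zip cp.2).foldl (fun acc c => acc ++ [c.1.zip c.2]) []
  (cp.1, results)

-- ===== PORT B =====
-- one iteration of B's outer loop: reversed pass carrying the pending I-suffix cur;
-- python's words.append(…)+words.reverse() is the append-fold followed by .reverse
def pvBSent (text label : List String) : List String × List (String × String) :=
  let st := (text.reverse.zip ((label.take text.length).reverse)).foldl
    (fun (st : List (String × String) × String) p =>
      if pvIsBS p.2 then (st.1 ++ [(p.1 ++ st.2, pvTagOf p.2)], "")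
      else if pvIsI p.2 then (st.1, p.1 ++ st.2)
      else st) ([], "")
  let words := st.1.reverse
  (words.map (fun w => w.1), words)

def segmentor_alt (texts : List (List String)) (labels : List (List String)) : List (List String) × (List (List (String × String))) :=
  (texts.zip labels).foldl
    (fun acc p => (acc.1 ++ [(pvBSent p.1 p.2).1], acc.2 ++ [(pvBSent p.1 p.2).2])) ([], [])

-- ===== PRECONDITION & SPEC =====
-- A indexes label[i] for every i < len(text): it raises IndexError exactly when some
-- zipped label list is shorter than its text list; Pre_ excludes exactly those crashes.
def Pre_segmentor (texts : List (List String)) (labels : List (List String)) : Prop :=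
  ∀ p ∈ texts.zip labels, p.1.length ≤ p.2.length
instance (texts : List (List String)) (labels : List (List String)) : Decidable (Pre_segmentor texts labels) := by unfold Pre_segmentor; infer_instance
def pvWitness_segmentor : List (List String) × List (List String) :=
  ([["ab", "c", "de"]], [["B-NN", "I-NN", "S-V"]])

def Spec_segmentor (texts : List (List String)) (labels : List (List String)) (out : List (List String) × (List (List (String × String)))) : Prop := out = segmentor_alt texts labels
instance (texts : List (List String)) (labels : List (List String)) (out : List (List String) × (List (List (String × String)))) : Decidable (Spec_segmentor texts labels out) := by unfold Spec_segmentor; infer_instance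

-- ===== CLAIM (what is proved, stated in full; the proofs are below) =====
def Claim_equal_segmentor : Prop := ∀ (texts : List (List String)) (labels : List (List String)), Dom_segmentor texts labels → Pre_segmentor texts labels → Spec_segmentor texts labels (segmentor texts labels)

-- ===== LEMMAS AND PROOFS =====

-- the common right-fold description of one sentence:
-- (finished (word, tag) pairs, pending suffix of I-labelled characters)
def pvSpecF (ps : List (String × String)) : List (String × String) × String :=
  ps.foldr
    (fun p st =>
      if pvIsBS p.2 then ((p.1 ++ st.2, pvTagOf p.2) :: st.1, "")
      else if pvIsI p.2 then (st.1, p.1 ++ st.2)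
      else st) ([], "")

theorem pvAGo_fin (text : List String) : ∀ (label : List String), text.length ≤ label.length →
    ∀ T L t l,
      (pvAGo text label T L t l).1 ++ [(pvAGo text label T L t l).2.2.1]
          = T ++ (t ++ (pvSpecF (text.zip label)).2.toList)
              :: (pvSpecF (text.zip label)).1.map (fun w => w.1.toList)
        ∧ (pvAGo text label T L t l).2.1 ++ [(pvAGo text label T L t l).2.2.2]
          = L ++ l :: (pvSpecF (text.zip label)).1.map (fun w => w.2.toList) := by
  induction text with
  | nil => intro label _ T L t l; simp [pvAGo, pvSpecF]
  | cons x xs ih =>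
    intro label hlen T L t l
    cases label with
    | nil => simp at hlen
    | cons lab labs =>
      simp only [List.length_cons, Nat.add_le_add_iff_right] at hlen
      simp only [List.zip_cons_cons, pvSpecF, List.foldr_cons]
      by_cases hbs : pvIsBS lab
      · simp only [pvAGo, hbs, if_pos]
        obtain ⟨h1, h2⟩ := ih labs hlen (T ++ [t]) (L ++ [l]) x.toList (pvTagOf lab).toList
        refine ⟨?_, ?_⟩
        · rw [h1]; simp [pvSpecF, String.toList_append]
        · rw [h2]; simp [pvSpecF]
      · by_cases hi : pvIsI lab
        · simp only [pvAGo, hbs, hi, if_neg, if_pos, Bool.false_eq_true, not_false_iff]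
          obtain ⟨h1, h2⟩ := ih labs hlen T L (t ++ x.toList) l
          refine ⟨?_, ?_⟩
          · rw [h1]; simp [pvSpecF, String.toList_append]
          · rw [h2]; simp [pvSpecF]
        · simp only [pvAGo, hbs, hi, if_neg, Bool.false_eq_true, not_false_iff]
          obtain ⟨h1, h2⟩ := ih labs hlen T L t l
          exact ⟨by rw [h1]; simp [pvSpecF], by rw [h2]; simp [pvSpecF]⟩

theorem pvFoldlPair {α β γ : Type} (f : α → β) (g : α → γ) :
    ∀ (l : List α) (a : List β) (b : List γ),
      l.foldl (fun acc p => (acc.1 ++ [f p], acc.2 ++ [g p])) (a, b) = (a ++ l.map f, b ++ l.map g) := by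
  intro l
  induction l with
  | nil => intro a b; simp
  | cons x xs ih => intro a b; simp [List.foldl_cons, ih]

theorem pvFoldJoin (l : List (List Char × List Char)) (a b : List String) :
    l.foldl (fun acc p => (acc.1 ++ [String.ofList p.1], acc.2 ++ [String.ofList p.2])) (a, b)
      = (a ++ l.map (fun p => String.ofList p.1), b ++ l.map (fun p => String.ofList p.2)) :=
  pvFoldlPair _ _ l a b

theorem pvFoldA (l : List (List String × List String)) (a : List (List String)) (b : List (List String)) :
    l.foldl (fun acc p => (acc.1 ++ [(pvASent p.1 p.2).1], acc.2 ++ [(pvASent p.1 p.2).2])) (a, b)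
      = (a ++ l.map (fun p => (pvASent p.1 p.2).1), b ++ l.map (fun p => (pvASent p.1 p.2).2)) :=
  pvFoldlPair _ _ l a b

theorem pvFoldB (l : List (List String × List String)) (a : List (List String)) (b : List (List (String × String))) :
    l.foldl (fun acc p => (acc.1 ++ [(pvBSent p.1 p.2).1], acc.2 ++ [(pvBSent p.1 p.2).2])) (a, b)
      = (a ++ l.map (fun p => (pvBSent p.1 p.2).1), b ++ l.map (fun p => (pvBSent p.1 p.2).2)) :=
  pvFoldlPair _ _ l a b

theorem pvASent_spec (text label : List String) (h : text.length ≤ label.length) :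
    pvASent text label =
      ((pvSpecF (text.zip label)).1.map (fun w => w.1),
       (pvSpecF (text.zip label)).1.map (fun w => w.2)) := by
  obtain ⟨h1, h2⟩ := pvAGo_fin text label h [] [] [] []
  simp only [pvASent]
  rw [h1, h2]
  simp only [List.nil_append, List.drop_succ_cons, List.drop_zero]
  rw [List.zip_map', pvFoldJoin]
  simp only [List.nil_append, List.map_map, Prod.mk.injEq]
  constructor <;> · apply List.map_congr_left; intro w _; simp [String.ofList_toList]

theorem pvZipTake {α β : Type} : ∀ (xs : List α) (ys : List β), xs.zip (ys.take xs.length) = xs.zip ys := by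
  intro xs
  induction xs with
  | nil => intro ys; simp
  | cons x xs ih =>
    intro ys
    cases ys with
    | nil => simp
    | cons y ys => simp [ih]

theorem pvZipReverse {α β : Type} : ∀ (xs : List α) (ys : List β), xs.length = ys.length →
    xs.reverse.zip ys.reverse = (xs.zip ys).reverse := by
  intro xs
  induction xs with
  | nil => intro ys h; simp
  | cons x xs ih =>
    intro ys h
    cases ys with
    | nil => simp at h
    | cons y ys =>
      simp only [List.length_cons, Nat.add_right_cancel_iff] at h
      simp only [List.reverse_cons, List.zip_cons_cons]
      rw [List.zip_append (by simp [h]), ih ys h]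
      simp

theorem pvSpecRev : ∀ (ps : List (String × String)),
    ps.foldr
      (fun p st =>
        if pvIsBS p.2 then (st.1 ++ [(p.1 ++ st.2, pvTagOf p.2)], "")
        else if pvIsI p.2 then (st.1, p.1 ++ st.2)
        else st) (([] : List (String × String)), "")
      = ((pvSpecF ps).1.reverse, (pvSpecF ps).2) := by
  intro ps
  induction ps with
  | nil => simp [pvSpecF]
  | cons p rest ih =>
    simp only [List.foldr_cons, ih, pvSpecF]
    by_cases hbs : pvIsBS p.2
    · simp [hbs]
    · by_cases hi : pvIsI p.2 <;> simp [hbs, hi]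

theorem pvBSent_spec (text label : List String) (h : text.length ≤ label.length) :
    pvBSent text label =
      ((pvSpecF (text.zip label)).1.map (fun w => w.1), (pvSpecF (text.zip label)).1) := by
  simp only [pvBSent]
  have hlen : text.length = (label.take text.length).length := by simp [h]
  rw [pvZipReverse text (label.take text.length) hlen, List.foldl_reverse, pvZipTake, pvSpecRev]
  simp

theorem pvSent_pair (text label : List String) (h : text.length ≤ label.length) :
    (pvASent text label).1 = (pvBSent text label).1 ∧
    (pvASent text label).1.zip (pvASent text label).2 = (pvBSent text label).2 := by
  rw [pvASent_spec text label h, pvBSent_spec text label h]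
  refine ⟨rfl, ?_⟩
  simp only [List.zip_map']
  exact List.map_id _

-- ===== VERDICT (by name: the statement is the Claim_ definition above) =====
theorem segmentor_spec : Claim_equal_segmentor := by
  intro texts labels _ hpre
  unfold Spec_segmentor segmentor segmentor_alt
  simp only []
  rw [pvFoldA, pvFoldB]
  simp only [List.nil_append, List.zip_map']
  rw [PySem.List.foldl_append_singleton_eq_map]
  simp only [List.nil_append, List.map_map, Prod.mk.injEq]
  constructor
  · apply List.map_congr_left
    intro p hp
    exact (pvSent_pair p.1 p.2 (hpre p hp)).1
  · apply List.map_congr_left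
    intro p hp
    exact (pvSent_pair p.1 p.2 (hpre p hp)).2
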